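-- pv_equiv track=rewrite | github.com/qeedquan/challenges | codegolf/ascending-pea-pattern-generator.py | peas
-- ===== SOURCE A (Python) =====
-- def peas(n):
--     s = "1"
--     for _ in range(n):
--         t = ""
--         for k in sorted(set(s)):
--             t += str(s.count(k)) + k
--         s = t
--     return int(s)
-- ===== SOURCE B (Python) =====
-- def peas(n):
--     # State is a 10-slot digit-count vector; the intermediate strings are never built.
--     if n <= 0:
--         return 1
--     cnt = [0] * 10
--     cnt[1] = 1                      # counts of the seed string "1"
--     for _ in range(n - 1):
--         new = [0] * 10
--         for d in range(10):
--             if cnt[d]: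
--                 for ch in str(cnt[d]):
--                     new[ord(ch) - 48] += 1
--                 new[d] += 1
--         if new == cnt:              # fixed point: further rounds cannot change anything
--             break
--         cnt = new
--     return int("".join(str(cnt[d]) + str(d) for d in range(10) if cnt[d]))
-- ===== Notes on version B (the rewrite author's own statement) =====
-- stated objective: faster
-- what changed: B never builds the intermediate strings: its state is a ten-slot digit-count vector, each round tallies the decimal digits of the ten counts directly into a fresh vector (O(1) work per round instead of scanning/sorting a string), the string is rendered only once at the end, and the loop stops at the fixed point so the round count no longer grows with n.
import Mathlib
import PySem

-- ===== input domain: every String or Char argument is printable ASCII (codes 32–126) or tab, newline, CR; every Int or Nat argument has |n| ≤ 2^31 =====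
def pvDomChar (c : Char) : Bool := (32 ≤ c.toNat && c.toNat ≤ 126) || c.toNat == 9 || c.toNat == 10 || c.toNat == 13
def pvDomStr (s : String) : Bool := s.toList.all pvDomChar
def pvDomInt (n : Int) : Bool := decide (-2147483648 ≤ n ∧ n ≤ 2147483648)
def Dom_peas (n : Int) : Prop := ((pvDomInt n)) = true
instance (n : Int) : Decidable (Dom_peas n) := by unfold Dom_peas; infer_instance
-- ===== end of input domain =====

-- B drops the string representation altogether: its state is a ten-slot digit-count vector,
-- each round tallies the decimal digits of the ten counts into a fresh vector, stops at the
-- fixed point, and renders the string only once at the end.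

-- ===== PORT A =====
-- inner loop: t = ""; for k in sorted(set(s)): t += str(s.count(k)) + k
def stepA (s : List Char) : List Char :=
  (PySem.List.sorted (PySem.Set.ofList s) (fun c => c)).foldl
    (fun t k => t ++ (PySem.Int.toChars ((PySem.Chars.count s [k] : Nat) : Int) ++ [k])) []

def peas (n : Int) : Int :=
  (PySem.Int.ofChars? ((PySem.List.pyRange 0 n).foldl (fun s _ => stepA s) ['1'])).getD 0

-- ===== PORT B =====
-- for ch in str(cnt[d]): new[ord(ch) - 48] += 1   (index always 0..9 here, so pyGetD/pySetD are exact)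
def tallyB (new : List Int) (m : Int) : List Int :=
  (PySem.Int.toChars m).foldl
    (fun nw ch =>
      PySem.List.pySetD nw ((ch.toNat : Int) - 48) (PySem.List.pyGetD nw ((ch.toNat : Int) - 48) 0 + 1))
    new

-- new = [0]*10; for d in range(10): if cnt[d]: <tally digits of cnt[d]>; new[d] += 1
def stepBc (c : List Int) : List Int :=
  (PySem.List.pyRange 0 10).foldl
    (fun new d =>
      if PySem.List.pyGetD c d 0 ≠ 0 then
        let nw := tallyB new (PySem.List.pyGetD c d 0)
        PySem.List.pySetD nw d (PySem.List.pyGetD nw d 0 + 1)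
      else new)
    (List.replicate 10 0)

-- for _ in range(n-1): new = <step>; if new == cnt: break; cnt = new
def loopB : Nat → List Int → List Int
  | 0, c => c
  | Nat.succ k, c =>
    let nw := stepBc c
    if nw = c then c else loopB k nw

-- "".join(str(cnt[d]) + str(d) for d in range(10) if cnt[d])
def renderB (c : List Int) : List Char :=
  (PySem.List.pyRange 0 10).foldl
    (fun t d =>
      if PySem.List.pyGetD c d 0 ≠ 0 then
        t ++ (PySem.Int.toChars (PySem.List.pyGetD c d 0) ++ PySem.Int.toChars d)
      else t) []

def peas_alt (n : Int) : Int :=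
  if n ≤ 0 then 1
  else
    (PySem.Int.ofChars?
      (renderB (loopB (n - 1).toNat (PySem.List.pySetD (List.replicate 10 0) 1 1)))).getD 0

-- ===== PRECONDITION & SPEC =====
def Spec_peas (n : Int) (out : Int) : Prop := out = peas_alt n
instance (n : Int) (out : Int) : Decidable (Spec_peas n out) := by unfold Spec_peas; infer_instance

-- ===== CLAIM (what is proved, stated in full; the proofs are below) =====
def Claim_equal_peas : Prop := ∀ (n : Int), Dom_peas n → Spec_peas n (peas n)

-- ===== LEMMAS AND PROOFS =====

-- the digit character of d (for d < 10)
def dchar (d : Nat) : Char := Char.ofNat (48 + d)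

-- digit-count vector of a string
def countsV (s : List Char) : List Int := (List.range 10).map (fun d => ((s.count (dchar d) : Nat) : Int))

-- all characters are decimal digits
def AllDig (s : List Char) : Prop := ∀ ch ∈ s, 48 ≤ ch.toNat ∧ ch.toNat < 58

-- contribution of slot d to the count of digit e after one round
def contrib (c : List Int) (d : Int) (e : Nat) : Int :=
  if PySem.List.pyGetD c d 0 ≠ 0 then
    (((PySem.Int.toChars (PySem.List.pyGetD c d 0)).count (dchar e) : Nat) : Int)
      + (if d = (e : Nat) then 1 else 0)
  else 0

lemma dchar_toNat (d : Nat) (h : d < 10) : (dchar d).toNat = 48 + d := by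
  interval_cases d <;> rfl

lemma dchar_eq_iff_toNat (d : Nat) (h : d < 10) (ch : Char) :
    dchar d = ch ↔ 48 + d = ch.toNat := by
  constructor
  · rintro rfl; exact (dchar_toNat d h).symm
  · intro he
    have h2 := Char.ofNat_toNat ch
    rw [← he] at h2
    exact h2.symm ▸ rfl

lemma dchar_inj (d e : Nat) (hd : d < 10) (he : e < 10) : dchar d = dchar e ↔ d = e := by
  constructor
  · intro hEq
    have h2 := congrArg Char.toNat hEq
    rw [dchar_toNat d hd, dchar_toNat e he] at h2
    omega
  · rintro rfl; rfl

lemma dchar_lt (d e : Nat) (hd : d < 10) (he : e < 10) : dchar d < dchar e ↔ d < e := by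
  interval_cases d <;> interval_cases e <;> decide

-- s.count(k) for a one-character needle is the character count
lemma go_count (c : Char) : ∀ (l : List Char) (fuel acc : Nat), l.length ≤ fuel →
    PySem.Chars.count.go [c] fuel l acc = acc + l.count c := by
  intro l
  induction l with
  | nil => intro fuel acc _; cases fuel <;> simp [PySem.Chars.count.go]
  | cons h t ih =>
    intro fuel acc hle
    cases fuel with
    | zero => simp at hle
    | succ k =>
      simp only [List.length_cons, Nat.add_le_add_iff_right] at hle
      by_cases hc : h = c
      · subst hc
        simp [PySem.Chars.count.go, List.isPrefixOf, ih k (acc + 1) hle]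
        omega
      · simp [PySem.Chars.count.go, List.isPrefixOf, Ne.symm hc, ih k acc hle, hc]

lemma count_single (s : List Char) (c : Char) : PySem.Chars.count s [c] = s.count c := by
  simp [PySem.Chars.count, go_count c s s.length 0 le_rfl]

-- str(m) for m ≥ 0 consists of digit characters
lemma toDigitsCore_digits (f : Nat) : ∀ (n : Nat) (l : List Char),
    (∀ c ∈ l, 48 ≤ c.toNat ∧ c.toNat < 58) →
    ∀ c ∈ Nat.toDigitsCore 10 f n l, 48 ≤ c.toNat ∧ c.toNat < 58 := by
  induction f with
  | zero => intro n l hl; simpa [Nat.toDigitsCore] using hl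
  | succ f ih =>
    intro n l hl
    have hm : n % 10 < 10 := Nat.mod_lt _ (by norm_num)
    have hd : 48 ≤ (Nat.digitChar (n % 10)).toNat ∧ (Nat.digitChar (n % 10)).toNat < 58 := by
      set k := n % 10 with hk
      interval_cases k <;> decide
    have hl' : ∀ c ∈ Nat.digitChar (n % 10) :: l, 48 ≤ c.toNat ∧ c.toNat < 58 := by
      intro c hc
      rcases List.mem_cons.1 hc with rfl | hc
      · exact hd
      · exact hl c hc
    simp only [Nat.toDigitsCore]
    split
    · exact hl'
    · exact ih (n / 10) _ hl'

lemma toChars_digits (m : Int) (h : 0 ≤ m) :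
    ∀ ch ∈ PySem.Int.toChars m, 48 ≤ ch.toNat ∧ ch.toNat < 58 := by
  unfold PySem.Int.toChars
  rw [if_neg (by omega)]
  exact toDigitsCore_digits _ _ [] (by simp)

lemma toChars_digit_single (d : Nat) (h : d < 10) :
    PySem.Int.toChars (d : Int) = [dchar d] := by
  interval_cases d <;> decide

lemma getD_set (l : List Int) (i e : Nat) (hi : i < l.length) (v : Int) :
    (l.set i v).getD e 0 = if i = e then v else l.getD e 0 := by
  rw [List.getD_eq_getElem?_getD, List.getElem?_set]
  split
  · simp
  · rw [List.getD_eq_getElem?_getD]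

-- the digit-tally inner loop, pointwise
lemma tally_fold (L : List Char) (hL : ∀ ch ∈ L, 48 ≤ ch.toNat ∧ ch.toNat < 58) :
    ∀ (acc : List Int), acc.length = 10 →
      (L.foldl (fun nw ch =>
          PySem.List.pySetD nw ((ch.toNat : Int) - 48)
            (PySem.List.pyGetD nw ((ch.toNat : Int) - 48) 0 + 1)) acc).length = 10 ∧
      ∀ e : Nat, e < 10 →
        (L.foldl (fun nw ch =>
            PySem.List.pySetD nw ((ch.toNat : Int) - 48)
              (PySem.List.pyGetD nw ((ch.toNat : Int) - 48) 0 + 1)) acc).getD e 0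
          = acc.getD e 0 + (L.count (dchar e) : Nat) := by
  induction L with
  | nil => intro acc hacc; exact ⟨hacc, fun e he => by simp⟩
  | cons ch t ih =>
    intro acc hacc
    have hch := hL ch (by simp)
    have hL' : ∀ c ∈ t, 48 ≤ c.toNat ∧ c.toNat < 58 := fun c hc => hL c (List.mem_cons_of_mem _ hc)
    have hidx : ((ch.toNat : Int) - 48) = ((ch.toNat - 48 : Nat) : Int) := by omega
    set k := ch.toNat - 48 with hk
    have hk10 : k < 10 := by omega
    simp only [List.foldl_cons, hidx, PySem.List.pySetD_natCast, PySem.List.pyGetD_natCast]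
    have hlen' : (acc.set k (acc.getD k 0 + 1)).length = 10 := by simp [hacc]
    obtain ⟨hA, hB⟩ := ih hL' (acc.set k (acc.getD k 0 + 1)) hlen'
    refine ⟨hA, fun e he => ?_⟩
    rw [hB e he]
    have hiff : (ch = dchar e) ↔ (k = e) := by
      rw [eq_comm, dchar_eq_iff_toNat e he ch]; omega
    rw [getD_set acc k e (by omega) _]
    rw [List.count_cons]
    by_cases hke : k = e
    · rw [if_pos hke, if_pos (by simp [hiff.mpr hke])]
      rw [hke]
      push_cast; ring
    · rw [if_neg hke, if_neg (by simp [hiff, hke])]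
      push_cast; ring

lemma tallyB_spec (m : Int) (hm : 0 ≤ m) (acc : List Int) (hacc : acc.length = 10) :
    (tallyB acc m).length = 10 ∧ ∀ e : Nat, e < 10 →
      (tallyB acc m).getD e 0 = acc.getD e 0 + (((PySem.Int.toChars m).count (dchar e) : Nat) : Int) :=
  tally_fold (PySem.Int.toChars m) (toChars_digits m hm) acc hacc

-- the per-slot outer loop of stepBc, pointwise (the lambda is the zeta-reduced loop body)
lemma step_fold (c : List Int) (hlen : c.length = 10) (hc : ∀ x ∈ c, (0:Int) ≤ x) :
    ∀ (D : List Int), (∀ d ∈ D, 0 ≤ d ∧ d < 10) → ∀ (acc : List Int), acc.length = 10 →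
      (D.foldl (fun new d =>
          if PySem.List.pyGetD c d 0 ≠ 0 then
            PySem.List.pySetD (tallyB new (PySem.List.pyGetD c d 0)) d
              (PySem.List.pyGetD (tallyB new (PySem.List.pyGetD c d 0)) d 0 + 1)
          else new) acc).length = 10 ∧
      ∀ e : Nat, e < 10 →
        (D.foldl (fun new d =>
            if PySem.List.pyGetD c d 0 ≠ 0 then
              PySem.List.pySetD (tallyB new (PySem.List.pyGetD c d 0)) d
                (PySem.List.pyGetD (tallyB new (PySem.List.pyGetD c d 0)) d 0 + 1)
            else new) acc).getD e 0
          = acc.getD e 0 + (D.map (fun d => contrib c d e)).sum := by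
  intro D
  induction D with
  | nil => intro _ acc hacc; exact ⟨hacc, fun e he => by simp⟩
  | cons d T ih =>
    intro hD acc hacc
    obtain ⟨hd0, hd10⟩ := hD d (by simp)
    have hDT : ∀ x ∈ T, 0 ≤ x ∧ x < 10 := fun x hx => hD x (List.mem_cons_of_mem _ hx)
    have hdc : d = ((d.toNat : Nat) : Int) := by omega
    have hpy : PySem.List.pyGetD c d 0 = c.getD d.toNat 0 := by
      conv_lhs => rw [hdc]
      rw [PySem.List.pyGetD_natCast]
    have hIR : PySem.Raise.InRange c.length d := ⟨by rw [hlen]; omega, by rw [hlen]; omega⟩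
    have hmnn : (0:Int) ≤ c.getD d.toNat 0 := by
      rw [← hpy]; exact hc _ (PySem.List.pyGetD_mem c 0 hIR)
    simp only [List.foldl_cons, List.map_cons, List.sum_cons]
    by_cases hz : c.getD d.toNat 0 = 0
    · rw [if_neg (show ¬ PySem.List.pyGetD c d 0 ≠ 0 by rw [hpy]; simpa using hz)]
      obtain ⟨hA, hB⟩ := ih hDT acc hacc
      refine ⟨hA, fun e he => ?_⟩
      rw [hB e he]
      have hctr : contrib c d e = 0 := by
        simp only [contrib]
        rw [hpy, if_neg (by simpa using hz)]
      rw [hctr]; ring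
    · rw [if_pos (show PySem.List.pyGetD c d 0 ≠ 0 by rw [hpy]; exact hz)]
      rw [hdc]
      simp only [PySem.List.pySetD_natCast, PySem.List.pyGetD_natCast]
      obtain ⟨htl, htg⟩ := tallyB_spec (c.getD d.toNat 0) hmnn acc hacc
      have hlen2 : ((tallyB acc (c.getD d.toNat 0)).set d.toNat
          ((tallyB acc (c.getD d.toNat 0)).getD d.toNat 0 + 1)).length = 10 := by
        rw [List.length_set]; exact htl
      obtain ⟨hA, hB⟩ := ih hDT _ hlen2
      refine ⟨hA, fun e he => ?_⟩
      rw [hB e he]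
      rw [getD_set _ d.toNat e (by omega) _]
      have hctr : contrib c ((d.toNat : Nat) : Int) e =
          (((PySem.Int.toChars (c.getD d.toNat 0)).count (dchar e) : Nat) : Int)
            + (if ((d.toNat : Nat) : Int) = ((e : Nat) : Int) then 1 else 0) := by
        simp only [contrib, PySem.List.pyGetD_natCast]
        rw [if_pos hz]
      rw [hctr]
      by_cases hde : d.toNat = e
      · rw [if_pos hde, if_pos (by omega), htg d.toNat (by omega), hde]
        ring
      · rw [if_neg hde, if_neg (by omega), htg e he]
        ring

-- renderB as a flatMap
lemma renderB_flatMap (c : List Int) :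
    renderB c = (PySem.List.pyRange 0 10).flatMap
      (fun d => if PySem.List.pyGetD c d 0 ≠ 0 then
          PySem.Int.toChars (PySem.List.pyGetD c d 0) ++ PySem.Int.toChars d
        else []) := by
  unfold renderB
  rw [show (fun (t : List Char) (d : Int) =>
        if PySem.List.pyGetD c d 0 ≠ 0 then
          t ++ (PySem.Int.toChars (PySem.List.pyGetD c d 0) ++ PySem.Int.toChars d)
        else t)
      = fun (t : List Char) (d : Int) =>
          t ++ (if PySem.List.pyGetD c d 0 ≠ 0 then
              PySem.Int.toChars (PySem.List.pyGetD c d 0) ++ PySem.Int.toChars d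
            else []) from by funext t d; split <;> simp]
  rw [PySem.List.foldl_append_eq_flatMap, List.nil_append]

lemma flatMap_filter {α β : Type} (p : α → Bool) (h : α → List β) :
    ∀ l : List α, (l.filter p).flatMap h = l.flatMap (fun x => if p x then h x else []) := by
  intro l
  induction l with
  | nil => rfl
  | cons x t ih =>
    by_cases hp : p x
    · rw [List.filter_cons_of_pos hp, List.flatMap_cons, List.flatMap_cons, if_pos hp, ih]
    · rw [List.filter_cons_of_neg (by simpa using hp), List.flatMap_cons, if_neg hp, ih]
      simp

-- counting one digit in the rendered string
lemma render_count (c : List Int) (e : Nat) (he : e < 10) :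
    (((renderB c).count (dchar e) : Nat) : Int)
      = ((PySem.List.pyRange 0 10).map (fun d => contrib c d e)).sum := by
  rw [renderB_flatMap, List.count_flatMap, Nat.cast_list_sum, List.map_map]
  refine congrArg List.sum (List.map_congr_left ?_)
  intro d hd
  rw [PySem.List.mem_pyRange_one] at hd
  simp only [Function.comp_apply]
  by_cases hz : PySem.List.pyGetD c d 0 = 0
  · rw [if_neg (by simpa using hz)]
    have hctr : contrib c d e = 0 := by simp [contrib, hz]
    rw [hctr]; simp
  · rw [if_pos hz]
    have htd : PySem.Int.toChars d = [dchar d.toNat] := by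
      rw [show d = ((d.toNat : Nat) : Int) from by omega]
      exact toChars_digit_single _ (by omega)
    rw [List.count_append, htd, List.count_singleton]
    have hctr : contrib c d e =
        (((PySem.Int.toChars (PySem.List.pyGetD c d 0)).count (dchar e) : Nat) : Int)
          + (if d = ((e : Nat) : Int) then 1 else 0) := by
      simp only [contrib]
      rw [if_pos hz]
    rw [hctr]
    by_cases hde : d.toNat = e
    · rw [if_pos (show (dchar d.toNat == dchar e) = true from by
          rw [beq_iff_eq]; exact (dchar_inj _ _ (by omega) he).mpr hde),
        if_pos (show d = ((e : Nat) : Int) from by omega)]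
      push_cast; ring
    · rw [if_neg (show ¬ (dchar d.toNat == dchar e) = true from by
          rw [beq_iff_eq]; exact fun hEq => hde ((dchar_inj _ _ (by omega) he).mp hEq)),
        if_neg (show ¬ d = ((e : Nat) : Int) from by omega)]
      push_cast; ring

lemma renderB_allDig (c : List Int) (hlen : c.length = 10) (hc : ∀ x ∈ c, (0:Int) ≤ x) :
    AllDig (renderB c) := by
  rw [renderB_flatMap]
  intro ch hch
  rw [List.mem_flatMap] at hch
  obtain ⟨d, hd, hchm⟩ := hch
  rw [PySem.List.mem_pyRange_one] at hd
  have hIR : PySem.Raise.InRange c.length d := ⟨by rw [hlen]; omega, by rw [hlen]; omega⟩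
  have hnn : (0:Int) ≤ PySem.List.pyGetD c d 0 := hc _ (PySem.List.pyGetD_mem c 0 hIR)
  by_cases hz : PySem.List.pyGetD c d 0 = 0
  · rw [if_neg (by simpa using hz)] at hchm
    simp at hchm
  · rw [if_pos hz] at hchm
    rw [List.mem_append] at hchm
    rcases hchm with hchm | hchm
    · exact toChars_digits _ hnn ch hchm
    · have htd : PySem.Int.toChars d = [dchar d.toNat] := by
        rw [show d = ((d.toNat : Nat) : Int) from by omega]
        exact toChars_digit_single _ (by omega)
      rw [htd, List.mem_singleton] at hchm
      subst hchm
      rw [dchar_toNat _ (by omega)]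
      omega

lemma countsV_len (s : List Char) : (countsV s).length = 10 := by
  simp [countsV]

lemma countsV_nonneg (s : List Char) : ∀ x ∈ countsV s, (0:Int) ≤ x := by
  intro x hx
  simp only [countsV, List.mem_map] at hx
  obtain ⟨d, -, rfl⟩ := hx
  positivity

-- counts of the rendered string = one B round on the vector
lemma stepBc_eq (c : List Int) (hlen : c.length = 10) (hc : ∀ x ∈ c, (0:Int) ≤ x) :
    stepBc c = countsV (renderB c) := by
  have h := step_fold c hlen hc (PySem.List.pyRange 0 10)
      (by intro d hd; rw [PySem.List.mem_pyRange_one] at hd; omega)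
      (List.replicate 10 0) (by simp)
  have hsb : stepBc c = (PySem.List.pyRange 0 10).foldl (fun new d =>
      if PySem.List.pyGetD c d 0 ≠ 0 then
        PySem.List.pySetD (tallyB new (PySem.List.pyGetD c d 0)) d
          (PySem.List.pyGetD (tallyB new (PySem.List.pyGetD c d 0)) d 0 + 1)
      else new) (List.replicate 10 0) := rfl
  rw [hsb]
  apply List.ext_getElem
  · rw [h.1, countsV_len]
  · intro i h1 h2
    have hlenf := h.1
    have hi10 : i < 10 := by omega
    rw [← List.getD_eq_getElem _ 0 h1, ← List.getD_eq_getElem _ 0 h2]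
    rw [h.2 i hi10, List.getD_replicate _ (by omega)]
    simp only [countsV]
    rw [PySem.List.getD_map_range _ _ _ _ hi10, render_count c i hi10]
    ring

-- one A round on an all-digit string = render of its count vector
lemma stepA_eq (s : List Char) (hs : AllDig s) : stepA s = renderB (countsV s) := by
  have hKF : PySem.List.sorted (PySem.Set.ofList s) (fun c => c)
      = ((List.range 10).filter (fun d => s.count (dchar d) != 0)).map dchar := by
    apply PySem.List.sorted_eq_of_perm_of_pairwise_lt
    · rw [List.perm_ext_iff_of_nodup
        (List.Nodup.map_on
          (fun x hx y hy hxy => (dchar_inj x y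
            (List.mem_range.mp (List.mem_filter.1 hx).1)
            (List.mem_range.mp (List.mem_filter.1 hy).1)).mp hxy)
          (List.Nodup.filter _ List.nodup_range))
        (PySem.Set.nodup_ofList s)]
      intro a
      constructor
      · intro ha
        rw [List.mem_map] at ha
        obtain ⟨d, hdF, rfl⟩ := ha
        rw [List.mem_filter] at hdF
        have hcp : 0 < s.count (dchar d) := by
          have h2 := hdF.2
          rw [bne_iff_ne] at h2
          omega
        rw [PySem.Set.mem_ofList]
        exact List.count_pos_iff.mp hcp
      · intro ha
        rw [PySem.Set.mem_ofList] at ha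
        obtain ⟨h48, h58⟩ := hs a ha
        have hda : dchar (a.toNat - 48) = a :=
          (dchar_eq_iff_toNat _ (by omega) a).mpr (by omega)
        rw [List.mem_map]
        refine ⟨a.toNat - 48, ?_, hda⟩
        rw [List.mem_filter]
        refine ⟨List.mem_range.mpr (by omega), ?_⟩
        rw [hda, bne_iff_ne]
        have hcp : 0 < s.count a := List.count_pos_iff.mpr ha
        omega
    · rw [List.pairwise_map]
      refine List.Pairwise.imp_of_mem ?_ (List.Pairwise.filter _ List.pairwise_lt_range)
      intro x y hx hy hlt
      exact (dchar_lt x y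
        (List.mem_range.mp (List.mem_filter.1 hx).1)
        (List.mem_range.mp (List.mem_filter.1 hy).1)).mpr hlt
  unfold stepA
  rw [PySem.List.foldl_append_eq_flatMap, List.nil_append, hKF, List.flatMap_map]
  rw [renderB_flatMap]
  have hR : PySem.List.pyRange 0 10 = (List.range 10).map (fun k : Nat => (k : Int)) := by
    decide
  rw [hR, List.flatMap_map, flatMap_filter]
  apply List.flatMap_congr
  intro d hd
  have hd10 : d < 10 := List.mem_range.mp hd
  have hpy : PySem.List.pyGetD (countsV s) ((d : Nat) : Int) 0 = ((s.count (dchar d) : Nat) : Int) := by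
    rw [PySem.List.pyGetD_natCast]
    simp only [countsV]
    rw [PySem.List.getD_map_range _ _ _ _ hd10]
  by_cases hz : s.count (dchar d) = 0
  · rw [if_neg (by simp [hz]), if_neg (by rw [hpy, hz]; simp)]
  · rw [if_pos (by simp [hz]), if_pos (by rw [hpy]; simpa using hz)]
    rw [hpy, count_single, toChars_digit_single d hd10]

lemma foldl_const_iterate {α β : Type} (f : α → α) : ∀ (l : List β) (s : α),
    l.foldl (fun s _ => f s) s = f^[l.length] s := by
  intro l
  induction l with
  | nil => intro s; rfl
  | cons x t ih => intro s; simp [List.foldl_cons, ih, Function.iterate_succ_apply]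

lemma loopB_iterate : ∀ (k : Nat) (c : List Int), loopB k c = stepBc^[k] c := by
  intro k
  induction k with
  | zero => intro c; rfl
  | succ m ih =>
    intro c
    show (if stepBc c = c then c else loopB m (stepBc c)) = _
    by_cases h : stepBc c = c
    · simp [h, Function.iterate_fixed h]
    · simp [h, ih, Function.iterate_succ_apply]

lemma bridge : ∀ (m : Nat) (s : List Char), AllDig s →
    stepA^[m + 1] s = renderB (stepBc^[m] (countsV s)) := by
  intro m
  induction m with
  | zero => intro s hs; simpa using stepA_eq s hs
  | succ k ih =>
    intro s hs
    have h1 : stepA s = renderB (countsV s) := stepA_eq s hs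
    have h2 : AllDig (stepA s) := by
      rw [h1]; exact renderB_allDig _ (countsV_len s) (countsV_nonneg s)
    calc stepA^[k + 1 + 1] s = stepA^[k + 1] (stepA s) := Function.iterate_succ_apply stepA _ s
      _ = renderB (stepBc^[k] (countsV (stepA s))) := ih _ h2
      _ = renderB (stepBc^[k] (stepBc (countsV s))) := by
            rw [h1, ← stepBc_eq _ (countsV_len s) (countsV_nonneg s)]
      _ = renderB (stepBc^[k + 1] (countsV s)) := by
            rw [Function.iterate_succ_apply]

-- ===== VERDICT (by name: the statement is the Claim_ definition above) =====
theorem peas_spec : Claim_equal_peas := by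
  intro n _
  unfold Spec_peas peas peas_alt
  by_cases hn : n ≤ 0
  · rw [PySem.List.pyRange_one_eq_nil hn]
    simp [hn]
    decide
  · rw [if_neg hn]
    rw [foldl_const_iterate, PySem.List.length_pyRange_one]
    have hd1 : AllDig ['1'] := by
      intro ch hch
      rcases List.mem_singleton.mp hch with rfl
      exact ⟨by decide, by decide⟩
    have hm : (n - 0).toNat = (n - 1).toNat + 1 := by omega
    rw [hm, bridge ((n-1).toNat) ['1'] hd1, loopB_iterate]
    have : countsV ['1'] = PySem.List.pySetD (List.replicate 10 0) 1 1 := by decide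
    rw [this]
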